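-- pv_equiv track=rewrite | github.com/wadeKings/CS61a-sp22 | lab04recursion/parsons_probs/line_stepper.py | line_stepper
-- ===== SOURCE A (Python) =====
-- def line_stepper(start, k):
--     """
--     完成函数 line_stepper,在数轴从start开始走k步到0的路径数
--     每一步,您必须向左或向右移动
--     >>> line_stepper(1, 1)
--     1
--     >>> line_stepper(0, 2)
--     2
--     >>> line_stepper(-3, 3)
--     1
--     >>> line_stepper(3, 5)
--     5
--     """
--     if start == 0 and k == 0:
--         return 1
--     elif k == 0:
--         return 0
--     else:
--         left = line_stepper(start-1, k-1)
--         right = line_stepper(start+1, k-1)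
--         return left + right
-- ===== SOURCE B (Python) =====
-- def line_stepper(start, k):
--     # Closed form: a k-step +-1 walk from start to 0 chooses which (k-start)/2
--     # of the k steps go right (+1); valid only if k-start is even and in [0, 2k].
--     # The answer is then the binomial coefficient C(k, (k-start)//2).
--     if k < 0:
--         return 0
--     d = k - start
--     if d < 0 or d > 2 * k or d % 2 != 0:
--         return 0
--     r = d // 2
--     c = 1
--     for i in range(r):
--         c = c * (k - i) // (i + 1)
--     return c
-- ===== Notes on version B (the rewrite author's own statement) =====
-- stated objective: faster
-- what changed: Replaces the exponential branching recursion with the closed-form binomial coefficient C(k,(k-start)/2) (after a parity/range check), computed by a short multiplicative loop; intended as faster (a timing run measured A timing out at n=16 where B returned, so no ratio at a common size).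
import Mathlib
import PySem

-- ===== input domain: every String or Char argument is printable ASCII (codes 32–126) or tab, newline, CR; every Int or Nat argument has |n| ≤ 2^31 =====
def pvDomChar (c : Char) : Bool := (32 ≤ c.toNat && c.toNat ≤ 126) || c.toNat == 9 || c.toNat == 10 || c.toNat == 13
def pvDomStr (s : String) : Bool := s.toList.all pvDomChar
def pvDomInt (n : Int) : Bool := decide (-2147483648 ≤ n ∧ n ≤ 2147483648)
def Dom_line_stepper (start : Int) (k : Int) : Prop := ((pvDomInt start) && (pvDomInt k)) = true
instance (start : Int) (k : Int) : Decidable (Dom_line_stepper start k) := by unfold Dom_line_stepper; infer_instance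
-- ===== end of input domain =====

-- B replaces A's exponential branching recursion by the closed-form binomial
-- coefficient C(k,(k-start)/2) computed with a short multiplicative loop; intended as
-- faster (measured: A already timed out at k=16 where B returned instantly).

-- ===== PORT A =====
-- literal port of A's recursion; for k < 0 Python recurses forever (RecursionError),
-- those inputs are outside Pre_, the extra `k < 0` branch only makes the recursion total
def line_stepper (start : Int) (k : Int) : Int :=
  if start = 0 ∧ k = 0 then 1
  else if k = 0 then 0
  else if k < 0 then 0
  else line_stepper (start - 1) (k - 1) + line_stepper (start + 1) (k - 1)
termination_by k.toNat
decreasing_by all_goals omega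

-- ===== PORT B =====
def line_stepper_alt (start : Int) (k : Int) : Int :=
  if k < 0 then 0
  else
    let d := k - start
    if d < 0 ∨ d > 2 * k ∨ PySem.Int.mod d 2 ≠ 0 then 0
    else
      let r := PySem.Int.floordiv d 2
      (PySem.List.pyRange 0 r 1).foldl
        (fun c i => PySem.Int.floordiv (c * (k - i)) (i + 1)) 1

-- ===== PRECONDITION & SPEC =====
-- Pre_ excludes k < 0, where Python A recurses without bound (RecursionError)
def Pre_line_stepper (start : Int) (k : Int) : Prop := 0 ≤ k
instance (start : Int) (k : Int) : Decidable (Pre_line_stepper start k) := by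
  unfold Pre_line_stepper; infer_instance

def pvWitness_line_stepper : Int × Int := (3, 5)

def Spec_line_stepper (start : Int) (k : Int) (out : Int) : Prop := out = line_stepper_alt start k
instance (start : Int) (k : Int) (out : Int) : Decidable (Spec_line_stepper start k out) := by unfold Spec_line_stepper; infer_instance

-- ===== CLAIM (what is proved, stated in full; the proofs are below) =====
def Claim_equal_line_stepper : Prop := ∀ (start : Int) (k : Int), Dom_line_stepper start k → Pre_line_stepper start k → Spec_line_stepper start k (line_stepper start k)

-- ===== LEMMAS AND PROOFS =====

-- characterisation of A's recursion as a binomial coefficient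
theorem lineA_eq (n : Nat) : ∀ start : Int,
    line_stepper start n =
      if 0 ≤ (n : Int) - start ∧ (n : Int) - start ≤ 2 * n ∧ ((n : Int) - start) % 2 = 0
      then (n.choose (((n : Int) - start) / 2).toNat : Int) else 0 := by
  induction n with
  | zero =>
    intro start
    rw [line_stepper]
    by_cases h : start = 0 <;> simp [h] <;> omega
  | succ n ih =>
    intro start
    rw [line_stepper]
    have hk0 : ¬ ((n : Int) + 1 = 0) := by omega
    push_cast
    rw [if_neg (by omega), if_neg (by omega), if_neg (by omega)]
    have e1 : (n : Int) + 1 - 1 = (n : Int) := by ring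
    rw [e1, ih (start - 1), ih (start + 1)]
    set D : Int := (n : Int) + 1 - start with hD
    have hd1 : (n : Int) - (start - 1) = D := by omega
    have hd2 : (n : Int) - (start + 1) = D - 2 := by omega
    rw [hd1, hd2]
    by_cases hpar : D % 2 = 0
    · obtain ⟨m, hm⟩ : ∃ m : Int, D = 2 * m := ⟨D / 2, by omega⟩
      have h2 : D / 2 = m := by omega
      have h3 : (D - 2) / 2 = m - 1 := by omega
      rcases lt_trichotomy m 0 with hm0 | hm0 | hm0
      · rw [if_neg (by omega), if_neg (by omega), if_neg (by omega)]; ring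
      · -- m = 0 : only the left branch contributes, both sides are 1
        rw [if_pos (by omega), if_neg (by omega), if_pos (by omega)]
        have : (D / 2).toNat = 0 := by omega
        simp [hm0, h2]
      · rcases lt_trichotomy m ((n : Int) + 1) with hmn | hmn | hmn
        · -- 1 ≤ m ≤ n : Pascal's rule
          rw [if_pos (by omega), if_pos (by omega), if_pos (by omega)]
          obtain ⟨j, hj⟩ : ∃ j : Nat, m = (j : Int) + 1 := ⟨(m - 1).toNat, by omega⟩
          have e2 : (D / 2).toNat = j + 1 := by omega
          have e3 : ((D - 2) / 2).toNat = j := by omega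
          rw [h2] at e2 ⊢
          rw [e2, e3, Nat.choose_succ_succ]
          push_cast; ring
        · -- m = n + 1 : only the right branch contributes, both sides are 1
          rw [if_neg (by omega), if_pos (by omega), if_pos (by omega)]
          have e2 : (D / 2).toNat = n + 1 := by omega
          have e3 : ((D - 2) / 2).toNat = n := by omega
          rw [e2, e3, Nat.choose_self, Nat.choose_self]
          ring
        · rw [if_neg (by omega), if_neg (by omega), if_neg (by omega)]; ring
    · rw [if_neg (by omega), if_neg (by omega), if_neg (by omega)]; ring

-- B's multiplicative loop computes the binomial coefficient
theorem loop_eq (k : Int) (hk : 0 ≤ k) : ∀ r : Nat, (r : Int) ≤ k →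
    (PySem.List.pyRange 0 (r : Int) 1).foldl
        (fun c i => PySem.Int.floordiv (c * (k - i)) (i + 1)) 1
      = (k.toNat.choose r : Int) := by
  intro r
  induction r with
  | zero => intro _; simp [PySem.List.pyRange_one_eq_nil]
  | succ r ih =>
    intro hr
    have hr' : (r : Int) ≤ k := by push_cast at hr; omega
    have hcast : ((r + 1 : Nat) : Int) = (r : Int) + 1 := by push_cast; ring
    rw [hcast, PySem.List.pyRange_one_succ_right (by positivity), List.foldl_append,
      ih hr']
    simp only [List.foldl_cons, List.foldl_nil]
    have hkr : k - (r : Int) = ((k.toNat - r : Nat) : Int) := by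
      push_cast; omega
    rw [hkr]
    have hchoose : (k.toNat.choose r : Int) * ((k.toNat - r : Nat) : Int)
        = (k.toNat.choose (r + 1) : Int) * ((r + 1 : Nat) : Int) := by
      exact_mod_cast congrArg (fun x : Nat => (x : Int)) (Nat.choose_succ_right_eq k.toNat r).symm
    have hb : ((r : Int) + 1) ≠ 0 := by positivity
    have hb2 : ((r + 1 : Nat) : Int) = (r : Int) + 1 := by push_cast; ring
    rw [hchoose, hb2, PySem.Int.floordiv, Int.mul_fdiv_cancel _ hb]

-- ===== VERDICT (by name: the statement is the Claim_ definition above) =====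
theorem line_stepper_spec : Claim_equal_line_stepper := by
  intro start k _ hk
  unfold Pre_line_stepper at hk
  unfold Spec_line_stepper line_stepper_alt
  obtain ⟨n, rfl⟩ : ∃ n : Nat, k = (n : Int) := ⟨k.toNat, by omega⟩
  rw [if_neg (by omega)]
  have hmod : PySem.Int.mod ((n : Int) - start) 2 = ((n : Int) - start) % 2 :=
    PySem.Int.mod_eq_emod_of_pos (by norm_num)
  have hdiv : PySem.Int.floordiv ((n : Int) - start) 2 = ((n : Int) - start) / 2 :=
    PySem.Int.floordiv_eq_ediv_of_pos (by norm_num)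
  rw [lineA_eq n start]
  by_cases hc : 0 ≤ (n : Int) - start ∧ (n : Int) - start ≤ 2 * n ∧ ((n : Int) - start) % 2 = 0
  · rw [if_pos hc, if_neg (by rw [hmod]; push_cast; omega)]
    simp only [hdiv]
    have hr : ((((n : Int) - start) / 2).toNat : Int) = ((n : Int) - start) / 2 := by
      omega
    rw [← hr, loop_eq (n : Int) (by positivity) _ (by omega)]
    congr 2
  · rw [if_neg hc, if_pos (by rw [hmod]; push_cast; omega)]
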